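-- pv_equiv track=rewrite | github.com/godekq/feature-dwi | Soal_BLQ/Soal 22.py | fibonacci_candles
-- ===== SOURCE A (Python) =====
-- def fibonacci_candles(array_input):
--     result = 0
--     array_fibonacci = [1, 1, 2, 3, 5, 8, 13]
--     temp = [array_input[i] - array_fibonacci[i] for i in range(len(array_input))]
--
--     for i in range(len(temp)):
--         if temp[i] <= 0:
--             result = array_input[i]
--
--     return result
-- ===== SOURCE B (Python) =====
-- def fibonacci_candles(array_input):
--     array_fibonacci = [1, 1, 2, 3, 5, 8, 13]
--     for i in range(len(array_input) - 1, -1, -1):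
--         if array_input[i] <= array_fibonacci[i]:
--             return array_input[i]
--     return 0
-- ===== Notes on version B (the rewrite author's own statement) =====
-- stated objective: simpler
-- what changed: Drops the intermediate difference list and the full forward scan: B scans indices in reverse and returns the first (i.e. last) element with array_input[i] <= fibonacci[i], defaulting to 0.
import Mathlib
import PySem

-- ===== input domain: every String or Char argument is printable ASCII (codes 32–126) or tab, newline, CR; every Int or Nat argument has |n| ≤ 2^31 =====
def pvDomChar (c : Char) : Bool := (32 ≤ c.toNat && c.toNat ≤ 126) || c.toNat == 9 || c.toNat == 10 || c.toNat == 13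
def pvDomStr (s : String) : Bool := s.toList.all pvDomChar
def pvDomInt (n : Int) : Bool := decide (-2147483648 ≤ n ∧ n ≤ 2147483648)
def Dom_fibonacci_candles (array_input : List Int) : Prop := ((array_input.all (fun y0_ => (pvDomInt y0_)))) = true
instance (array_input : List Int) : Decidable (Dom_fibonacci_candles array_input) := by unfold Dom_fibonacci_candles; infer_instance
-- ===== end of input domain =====

-- B replaces the intermediate difference list + forward last-match scan by a reverse scan
-- that returns the first matching element; equal return values on lists of length ≤ 7.
-- ===== PORT A =====
-- temp = [array_input[i] - array_fibonacci[i] for i in range(len(array_input))]; out-of-range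
-- pyGet? is defaulted with .getD 0, unreachable under Pre_ (length ≤ 7).
def fibonacci_candles (array_input : List Int) : Int :=
  let array_fibonacci : List Int := [1, 1, 2, 3, 5, 8, 13]
  let temp : List Int := (PySem.List.pyRange 0 array_input.length 1).map
      (fun i => (PySem.List.pyGet? array_input i).getD 0 - (PySem.List.pyGet? array_fibonacci i).getD 0)
  (PySem.List.pyRange 0 temp.length 1).foldl
    (fun result i =>
      if (PySem.List.pyGet? temp i).getD 0 ≤ 0 then (PySem.List.pyGet? array_input i).getD 0
      else result) 0

-- ===== PORT B =====
-- reverse loop: checks index n-1 first, early return; counter k+1 means "next index to try is k"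
def fibCandlesRev (array_input array_fibonacci : List Int) : Nat → Int
  | 0 => 0
  | k + 1 =>
      if (PySem.List.pyGet? array_input (k : Int)).getD 0
          ≤ (PySem.List.pyGet? array_fibonacci (k : Int)).getD 0 then
        (PySem.List.pyGet? array_input (k : Int)).getD 0
      else fibCandlesRev array_input array_fibonacci k

def fibonacci_candles_alt (array_input : List Int) : Int :=
  fibCandlesRev array_input [1, 1, 2, 3, 5, 8, 13] array_input.length

-- ===== PRECONDITION & SPEC =====
-- Pre_ excludes lists longer than the 7-entry fibonacci table, on which Python A raises IndexError.
def Pre_fibonacci_candles (array_input : List Int) : Prop := array_input.length ≤ 7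
instance (array_input : List Int) : Decidable (Pre_fibonacci_candles array_input) := by unfold Pre_fibonacci_candles; infer_instance
def pvWitness_fibonacci_candles : List Int := [3, 2, 9, 1]

def Spec_fibonacci_candles (array_input : List Int) (out : Int) : Prop := out = fibonacci_candles_alt array_input
instance (array_input : List Int) (out : Int) : Decidable (Spec_fibonacci_candles array_input out) := by unfold Spec_fibonacci_candles; infer_instance

-- ===== CLAIM (what is proved, stated in full; the proofs are below) =====
def Claim_equal_fibonacci_candles : Prop := ∀ (array_input : List Int), Dom_fibonacci_candles array_input → Pre_fibonacci_candles array_input → Spec_fibonacci_candles array_input (fibonacci_candles array_input)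

-- ===== LEMMAS AND PROOFS =====
-- the last-match foldl over range(0,n) equals the reverse first-match recursion
theorem loop_eq_rev (xs fib : List Int) (n : Nat) (hn : n ≤ xs.length) :
    (PySem.List.pyRange 0 (n : Int) 1).foldl
      (fun result i =>
        if (PySem.List.pyGet? ((PySem.List.pyRange 0 (xs.length : Int) 1).map
              (fun j => (PySem.List.pyGet? xs j).getD 0 - (PySem.List.pyGet? fib j).getD 0)) i).getD 0 ≤ 0
        then (PySem.List.pyGet? xs i).getD 0 else result) 0
      = fibCandlesRev xs fib n := by
  induction n with
  | zero => simp [PySem.List.pyRange_zero_nat, fibCandlesRev]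
  | succ k ih =>
    have hk : k < xs.length := Nat.lt_of_succ_le hn
    have hsplit : PySem.List.pyRange 0 ((k : Int) + 1) 1
        = PySem.List.pyRange 0 (k : Int) 1 ++ [(k : Int)] :=
      PySem.List.pyRange_one_succ_right (by exact_mod_cast Nat.zero_le k)
    have hcast : ((k + 1 : Nat) : Int) = (k : Int) + 1 := by push_cast; ring
    rw [hcast, hsplit, List.foldl_append, ih (Nat.le_of_lt hk)]
    have htemp : (PySem.List.pyGet? ((PySem.List.pyRange 0 (xs.length : Int) 1).map
          (fun j => (PySem.List.pyGet? xs j).getD 0 - (PySem.List.pyGet? fib j).getD 0)) (k : Int)).getD 0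
        = (PySem.List.pyGet? xs (k : Int)).getD 0 - (PySem.List.pyGet? fib (k : Int)).getD 0 := by
      have := PySem.List.pyGetD_map_pyRange
        (fun j => (PySem.List.pyGet? xs j).getD 0 - (PySem.List.pyGet? fib j).getD 0)
        xs.length k 0 hk
      simpa [PySem.List.pyGetD] using this
    simp only [List.foldl_cons, List.foldl_nil, htemp, fibCandlesRev]
    by_cases h : (PySem.List.pyGet? xs (k : Int)).getD 0 ≤ (PySem.List.pyGet? fib (k : Int)).getD 0
    · rw [if_pos (by omega), if_pos h]
    · rw [if_neg (by omega), if_neg h]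

-- ===== VERDICT (by name: the statement is the Claim_ definition above) =====
theorem fibonacci_candles_spec : Claim_equal_fibonacci_candles := by
  intro xs _ _
  unfold Spec_fibonacci_candles fibonacci_candles fibonacci_candles_alt
  have hlen : (((PySem.List.pyRange 0 (xs.length : Int) 1).map
      (fun j => (PySem.List.pyGet? xs j).getD 0 - (PySem.List.pyGet? [1, 1, 2, 3, 5, 8, 13] j).getD 0)).length : Int)
      = (xs.length : Int) := by
    simp [PySem.List.length_pyRange_one]
  simp only [hlen]
  exact loop_eq_rev xs [1, 1, 2, 3, 5, 8, 13] xs.length (le_refl _)
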